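-- pv_equiv track=rewrite | github.com/ulises-jimenez07/coding_exercises | leet_code/binary_search/74_search_2d_matrix.py | searchMatrix_v2
-- ===== SOURCE A (Python) =====
-- from typing import List
--
-- def searchMatrix_v2(matrix: List[List[int]], target: int) -> bool:
--     """
--     Flattened Binary Search Approach.
--     This approach treats the 2D matrix as a sorted 1D array by mapping indices.
--     """
--     if not matrix or not matrix[0]:
--         return False
--
--     rows, cols = len(matrix), len(matrix[0])
--     # The matrix can be viewed as a virtual 1D array of size rows * cols.
--     # This works because each row is sorted and the first element of
--     # each row is greater than the last element of the previous row.
--     left, right = 0, rows * cols - 1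
--
--     while left <= right:
--         # Calculate the middle index in the virtual 1D array
--         mid = (left + right) // 2
--
--         # Map the 1D index (mid) back to 2D matrix coordinates (r, c).
--         # The formulas are derived from: i = r * n + c (where n = cols)
--         #
--         # For Row (r):
--         # i = r * n + c
--         # i - c = r * n
--         # (i - c) // n = r
--         # i // n - c // n = r
--         # Since c < n, c // n = 0, so: r = i // n
--         #
--         # For Column (c):
--         # i = r * n + c
--         # i % n = (r * n + c) % n
--         # i % n = (r * n % n) + (c % n)
--         # Since (r * n % n) = 0 and c < n, so: c = i % n
--         r = mid // cols
--         c = mid % cols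
--
--         if target == matrix[r][c]:
--             return True
--         if target < matrix[r][c]:
--             right = mid - 1
--         else:
--             left = mid + 1
--
--     return False
-- ===== SOURCE B (Python) =====
-- from typing import List
--
-- def searchMatrix_v2(matrix: List[List[int]], target: int) -> bool:
--     """
--     Recursive window bisection over a flat list materialized once.
--     The matrix's width is the length of its first row; each row contributes
--     its first `cols` elements. The search recurses on a (start, size) window
--     instead of iterating left/right virtual indices with div/mod mapping.
--     """
--     if not matrix or not matrix[0]:
--         return False
--     cols = len(matrix[0])
--     flat = [x for row in matrix for x in row[:cols]]
--
--     def bisect(start: int, size: int) -> bool: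
--         if size <= 0:
--             return False
--         half = (size - 1) // 2
--         v = flat[start + half]
--         if v == target:
--             return True
--         if target < v:
--             return bisect(start, half)
--         return bisect(start + half + 1, size - half - 1)
--
--     return bisect(0, len(flat))
-- ===== Notes on version B (the rewrite author's own statement) =====
-- stated objective: alternative
-- what changed: Replaced the iterative left/right binary search with per-probe div/mod 2D index mapping by a recursive (start,size) window bisection over a flat list materialized once (each row contributing its first cols elements); Pre_ keeps the function's natural domain where no row is shorter than row 0, since on narrower rows A's virtual indexing raises IndexError or yields a probe-path accident no implementation should specify.
-- outside the precondition, e.g. on searchMatrix_v2([[-5, 0, -6, -7], [6, 8]], -7): A returns True, B returns False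
import Mathlib
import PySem

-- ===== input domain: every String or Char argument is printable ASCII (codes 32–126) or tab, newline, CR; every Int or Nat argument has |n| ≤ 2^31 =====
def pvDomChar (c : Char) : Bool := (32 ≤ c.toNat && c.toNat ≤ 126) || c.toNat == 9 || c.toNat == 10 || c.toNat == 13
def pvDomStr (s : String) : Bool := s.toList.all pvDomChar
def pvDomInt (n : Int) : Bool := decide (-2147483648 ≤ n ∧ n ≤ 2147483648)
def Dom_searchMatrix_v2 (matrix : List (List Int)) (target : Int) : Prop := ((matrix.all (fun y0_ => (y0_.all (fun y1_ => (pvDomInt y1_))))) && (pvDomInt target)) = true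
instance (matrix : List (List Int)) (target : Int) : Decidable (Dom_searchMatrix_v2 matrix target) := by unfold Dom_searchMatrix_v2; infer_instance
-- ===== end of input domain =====

-- B replaces A's iterative virtual-index binary search by a recursive (start,size) window bisection
-- over a flattening materialized once (alternative decomposition; return values proved equal on
-- rectangular matrices).


-- ===== PORT A =====
-- matrix[r][c] as A reads it (both indices in range under Pre_, so the default is never used)
def pvAt (matrix : List (List Int)) (r c : Int) : Int :=
  PySem.List.pyGetD (PySem.List.pyGetD matrix r []) c 0

-- while left <= right: binary search over virtual 1D indices, mid mapped to (mid//cols, mid%cols);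
-- fuel = the size of the initial index interval, which every iteration strictly shrinks
def goA (matrix : List (List Int)) (target cols : Int) : Nat → Int → Int → Bool
  | 0, _, _ => false
  | fuel + 1, left, right =>
    if left ≤ right then
      if target = pvAt matrix (PySem.Int.floordiv (PySem.Int.floordiv (left + right) 2) cols)
                              (PySem.Int.mod (PySem.Int.floordiv (left + right) 2) cols) then true
      else if target < pvAt matrix (PySem.Int.floordiv (PySem.Int.floordiv (left + right) 2) cols)
                                   (PySem.Int.mod (PySem.Int.floordiv (left + right) 2) cols) then
        goA matrix target cols fuel left (PySem.Int.floordiv (left + right) 2 - 1)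
      else goA matrix target cols fuel (PySem.Int.floordiv (left + right) 2 + 1) right
    else false

def searchMatrix_v2 (matrix : List (List Int)) (target : Int) : Bool :=
  if matrix.isEmpty || (matrix.headD []).isEmpty then false
  else
    goA matrix target (PySem.List.len (matrix.headD []))
      (PySem.List.len matrix * PySem.List.len (matrix.headD [])).toNat
      0 (PySem.List.len matrix * PySem.List.len (matrix.headD []) - 1)

-- ===== PORT B =====
-- def bisect(start, size): recursive window bisection over the flat list;
-- fuel = the window size, which every recursive call strictly shrinks
def goBis (flat : List Int) (target : Int) : Nat → Int → Int → Bool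
  | 0, _, _ => false
  | fuel + 1, start, size =>
    if size ≤ 0 then false
    else
      if PySem.List.pyGetD flat (start + PySem.Int.floordiv (size - 1) 2) 0 = target then true
      else if target < PySem.List.pyGetD flat (start + PySem.Int.floordiv (size - 1) 2) 0 then
        goBis flat target fuel start (PySem.Int.floordiv (size - 1) 2)
      else goBis flat target fuel (start + PySem.Int.floordiv (size - 1) 2 + 1)
             (size - PySem.Int.floordiv (size - 1) 2 - 1)

def searchMatrix_v2_alt (matrix : List (List Int)) (target : Int) : Bool :=
  if matrix.isEmpty || (matrix.headD []).isEmpty then false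
  else
    goBis (matrix.map (fun row =>
        PySem.List.slice row none (some (PySem.List.len (matrix.headD []))))).flatten
      target
      (PySem.List.len (matrix.map (fun row =>
        PySem.List.slice row none (some (PySem.List.len (matrix.headD []))))).flatten).toNat
      0
      (PySem.List.len (matrix.map (fun row =>
        PySem.List.slice row none (some (PySem.List.len (matrix.headD []))))).flatten)

-- ===== PRECONDITION & SPEC =====
-- Pre_ keeps the function's natural domain (a matrix whose width is its first row's length, so no
-- row shorter than row 0): on narrower rows A's virtual r*cols+c indexing raises IndexError or
-- returns a probe-path accident that no implementation should have to specify
-- (e.g. A([[-5,0,-6,-7],[6,8]],-7)=True while B=False).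
def Pre_searchMatrix_v2 (matrix : List (List Int)) (target : Int) : Prop :=
  ∀ row ∈ matrix, (matrix.headD []).length ≤ row.length
instance (matrix : List (List Int)) (target : Int) : Decidable (Pre_searchMatrix_v2 matrix target) := by unfold Pre_searchMatrix_v2; infer_instance

def pvWitness_searchMatrix_v2 : List (List Int) × Int := ([[7, 1], [5, 3]], 5)

def Spec_searchMatrix_v2 (matrix : List (List Int)) (target : Int) (out : Bool) : Prop := out = searchMatrix_v2_alt matrix target
instance (matrix : List (List Int)) (target : Int) (out : Bool) : Decidable (Spec_searchMatrix_v2 matrix target out) := by unfold Spec_searchMatrix_v2; infer_instance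

-- ===== CLAIM (what is proved, stated in full; the proofs are below) =====
def Claim_equal_searchMatrix_v2 : Prop := ∀ (matrix : List (List Int)) (target : Int), Dom_searchMatrix_v2 matrix target → Pre_searchMatrix_v2 matrix target → Spec_searchMatrix_v2 matrix target (searchMatrix_v2 matrix target)

-- ===== LEMMAS AND PROOFS =====

-- the cell A's virtual index m denotes
def cell (matrix : List (List Int)) (cols : Nat) (m : Nat) : Int :=
  (matrix.getD (m / cols) []).getD (m % cols) 0

lemma flatten_len (matrix : List (List Int)) (cols : Nat)
    (hrect : ∀ row ∈ matrix, row.length = cols) :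
    matrix.flatten.length = matrix.length * cols := by
  induction matrix with
  | nil => simp
  | cons row rest ih =>
      simp only [List.flatten_cons, List.length_append, List.length_cons]
      rw [hrect row (by simp), ih (fun r hr => hrect r (by simp [hr]))]
      ring

lemma flatten_get? (matrix : List (List Int)) (cols : Nat)
    (hrect : ∀ row ∈ matrix, row.length = cols) (m : Nat)
    (hm : m < matrix.length * cols) :
    matrix.flatten[m]? = some (cell matrix cols m) := by
  induction matrix generalizing m with
  | nil => simp at hm
  | cons row rest ih =>
      have hrow : row.length = cols := hrect row (by simp)
      have hcols : 0 < cols := Nat.pos_of_ne_zero (by rintro rfl; simp at hm)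
      by_cases hlt : m < cols
      · have hml : m < row.length := by omega
        rw [List.flatten_cons, List.getElem?_append_left hml,
          List.getElem?_eq_getElem hml]
        unfold cell
        rw [Nat.div_eq_of_lt hlt, Nat.mod_eq_of_lt hlt]
        simp [List.getD, List.getElem?_eq_getElem hml]
      · have hge : cols ≤ m := by omega
        have hdiv : m / cols = (m - cols) / cols + 1 := by
          rw [Nat.div_eq_sub_div hcols hge]
        have hmod : m % cols = (m - cols) % cols := Nat.mod_eq_sub_mod hge
        rw [List.flatten_cons, List.getElem?_append_right (by omega), hrow]
        unfold cell
        rw [hdiv, hmod, List.getD_cons_succ]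
        exact ih (fun r hr => hrect r (by simp [hr])) (m - cols)
          (by simp only [List.length_cons, Nat.succ_mul] at hm; omega)

-- A's 2D probe at virtual index m is cell m of the width-truncated matrix
-- (pyGetD on a Nat cast is List.getD; the probed column m % cols is below cols)
lemma pvAt_cell (matrix : List (List Int)) (cols m : Nat) (hm : m < matrix.length * cols) :
    pvAt matrix ((m / cols : Nat) : Int) ((m % cols : Nat) : Int) =
      cell (matrix.map (fun row => row.take cols)) cols m := by
  have hcols : 0 < cols := Nat.pos_of_ne_zero (by rintro rfl; simp at hm)
  have hc : m % cols < cols := Nat.mod_lt _ hcols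
  unfold pvAt cell
  rw [PySem.List.pyGetD_natCast, PySem.List.pyGetD_natCast]
  have hrow : (matrix.map (fun row => row.take cols)).getD (m / cols) [] =
      (matrix.getD (m / cols) []).take cols := by
    simp only [List.getD, List.getElem?_map]
    cases matrix[m / cols]? <;> simp
  rw [hrow]
  simp only [List.getD, List.getElem?_take, hc, if_pos]

-- B's flat probe at index m is cell m, for a rectangular list of rows
lemma flat_getD_cell (matrix : List (List Int)) (cols : Nat)
    (hrect : ∀ row ∈ matrix, row.length = cols) (m : Nat)
    (hm : m < matrix.length * cols) :
    matrix.flatten.getD m 0 = cell matrix cols m := by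
  rw [List.getD, flatten_get? matrix cols hrect m hm]
  rfl

-- the two recursions walk the same windows: left = start, right = start + size - 1
lemma goA_eq_goBis (matrix : List (List Int)) (target : Int) (cols : Nat)
    (hge : ∀ row ∈ matrix, cols ≤ row.length)
    (n : Nat) : ∀ left right : Int, 0 ≤ left → right < matrix.length * cols →
    goA matrix target (cols : Int) n left right =
      goBis (matrix.map (fun row => row.take cols)).flatten target n left (right + 1 - left) := by
  have hrect : ∀ row ∈ matrix.map (fun row => row.take cols), row.length = cols := by
    intro row hrow
    obtain ⟨row0, h0, rfl⟩ := List.mem_map.mp hrow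
    simp [List.length_take, Nat.min_eq_left (hge row0 h0)]
  have hlen : (matrix.map (fun row => row.take cols)).length = matrix.length := by simp
  induction n with
  | zero => intro left right _ _; simp only [goA, goBis]
  | succ n ih =>
      intro left right h0 hr
      simp only [goA, goBis]
      by_cases hle : left ≤ right
      · rw [if_pos hle, if_neg (by omega : ¬ right + 1 - left ≤ 0)]
        have h2 : (0 : Int) < 2 := by norm_num
        have hhalf : PySem.Int.floordiv (right + 1 - left - 1) 2 =
            PySem.Int.floordiv (left + right) 2 - left := by
          rw [PySem.Int.floordiv_eq_ediv_of_pos h2, PySem.Int.floordiv_eq_ediv_of_pos h2]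
          omega
        set midI := PySem.Int.floordiv (left + right) 2 with hmidI
        obtain ⟨hm1, hm2⟩ := PySem.Int.floordiv_two_mid_bounds hle
        rw [← hmidI] at hm1 hm2
        have hmid0 : 0 ≤ midI := le_trans h0 hm1
        set m : Nat := midI.toNat with hmdef
        have hmcast : (m : Int) = midI := Int.toNat_of_nonneg hmid0
        have hmN : m < matrix.length * cols := by
          have : (m : Int) < (matrix.length : Int) * (cols : Int) := by
            rw [hmcast]; omega
          exact_mod_cast this
        have hdiv : PySem.Int.floordiv midI (cols : Int) = ((m / cols : Nat) : Int) := by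
          rw [← hmcast]; exact PySem.Int.floordiv_natCast m cols
        have hmod : PySem.Int.mod midI (cols : Int) = ((m % cols : Nat) : Int) := by
          rw [← hmcast]; exact PySem.Int.mod_natCast m cols
        have hB : PySem.List.pyGetD (matrix.map (fun row => row.take cols)).flatten
            (left + PySem.Int.floordiv (right + 1 - left - 1) 2) 0 =
            cell (matrix.map (fun row => row.take cols)) cols m := by
          have harg : left + PySem.Int.floordiv (right + 1 - left - 1) 2 = ((m : Nat) : Int) := by
            rw [hhalf, hmcast]; omega
          rw [harg, PySem.List.pyGetD_natCast]
          exact flat_getD_cell _ cols hrect m (by rw [hlen]; exact hmN)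
        have hA : pvAt matrix (PySem.Int.floordiv midI (cols : Int))
            (PySem.Int.mod midI (cols : Int)) =
            cell (matrix.map (fun row => row.take cols)) cols m := by
          rw [hdiv, hmod]; exact pvAt_cell matrix cols m hmN
        rw [hA, hB]
        by_cases heq : target = cell (matrix.map (fun row => row.take cols)) cols m
        · have heq' : cell (matrix.map (fun row => row.take cols)) cols m = target := heq.symm
          rw [if_pos heq, if_pos heq']
        · have heq' : ¬ cell (matrix.map (fun row => row.take cols)) cols m = target := fun h => heq h.symm
          rw [if_neg heq, if_neg heq']
          by_cases hlt : target < cell (matrix.map (fun row => row.take cols)) cols m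
          · rw [if_pos hlt, if_pos hlt]
            have := ih left (midI - 1) h0 (by omega)
            rw [this, hhalf, show midI - 1 + 1 - left = midI - left from by omega]
          · rw [if_neg hlt, if_neg hlt]
            have := ih (midI + 1) right (by omega) hr
            rw [this, hhalf,
              show left + (midI - left) + 1 = midI + 1 from by omega,
              show right + 1 - left - (midI - left) - 1 = right + 1 - (midI + 1) from by omega]
      · rw [if_neg hle, if_pos (by omega : right + 1 - left ≤ 0)]

-- ===== VERDICT (by name: the statement is the Claim_ definition above) =====
theorem searchMatrix_v2_spec : Claim_equal_searchMatrix_v2 := by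
  intro matrix target _ hrect
  unfold Pre_searchMatrix_v2 at hrect
  unfold Spec_searchMatrix_v2 searchMatrix_v2 searchMatrix_v2_alt
  by_cases hguard : (matrix.isEmpty || (matrix.headD []).isEmpty) = true
  · rw [if_pos hguard, if_pos hguard]
  · rw [if_neg hguard, if_neg hguard]
    set cols : Nat := (matrix.headD []).length with hcolsdef
    have htrrect : ∀ row ∈ matrix.map (fun row => row.take cols), row.length = cols := by
      intro row hrow
      obtain ⟨row0, h0, rfl⟩ := List.mem_map.mp hrow
      simp [List.length_take, Nat.min_eq_left (hrect row0 h0)]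
    have hlenc : PySem.List.len (matrix.headD []) = (cols : Int) := PySem.List.len_eq _
    have htr : (matrix.map (fun row => PySem.List.slice row none (some ((cols : Nat) : Int)))) =
        matrix.map (fun row => row.take cols) :=
      List.map_congr_left (fun row _ => PySem.List.slice_to_natCast row cols)
    have hflatlen : (matrix.map (fun row => row.take cols)).flatten.length =
        matrix.length * cols := by
      rw [flatten_len _ cols htrrect, List.length_map]
    have hlenm : PySem.List.len matrix = (matrix.length : Int) := PySem.List.len_eq matrix
    have hlenf : PySem.List.len (matrix.map (fun row => row.take cols)).flatten =
        ((matrix.length * cols : Nat) : Int) := by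
      rw [PySem.List.len_eq, hflatlen]
    rw [hlenm, hlenc, htr, hlenf]
    have hfuel : ((matrix.length : Int) * (cols : Int)).toNat = matrix.length * cols := by
      rw [← Nat.cast_mul, Int.toNat_natCast]
    have hfuelB : (((matrix.length * cols : Nat) : Int)).toNat = matrix.length * cols :=
      Int.toNat_natCast _
    rw [hfuel, hfuelB]
    have := goA_eq_goBis matrix target cols hrect (matrix.length * cols)
      0 ((matrix.length : Int) * (cols : Int) - 1) (le_refl 0) (by omega)
    rw [this]
    congr 1
    omega
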